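-- pv_equiv track=rewrite | github.com/Sumukhmr/creatorhub-dashboard | app.py | text_to_filename
-- ===== SOURCE A (Python) =====
-- VOICES = {
--     'french': {
--         'id': 'vTGV06pygfwa2WhLDZFp',
--         'name': 'French Darling',
--         'native_suffix': '_french',
--         'english_suffix': '_english_frenchvoice'
--     },
--     'english': {
--         'id': 'jB2lPb5DhAX6l1TLkKXy',
--         'name': 'Sophia',
--         'native_suffix': '_english',
--         'english_suffix': '_english'
--     },
--     'spanish': {
--         'id': 'T4Au24Lt2uWk24Qra0No',
--         'name': 'Spanish Voice',
--         'native_suffix': '_spanish',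
--         'english_suffix': '_english_spanishvoice'
--     },
--     'german': {
--         'id': 'rKiu7lQ4c5P3az3745s3',
--         'name': 'Benjamin',
--         'native_suffix': '_german',
--         'english_suffix': '_english_germanvoice'
--     }
-- }
--
-- def text_to_filename(text, selected_voice, is_native):
--     """
--     Convert text to a safe filename format.
--
--     Args:
--         text (str): The text to convert
--         selected_voice (str): Selected voice/language
--         is_native (bool): Whether this is native language text
--
--     Returns:
--         str: Safe filename (without extension)
--     """
--     # Take first 10 words
--     words = text.strip().replace('\n', ' ').split()[:10]
--     filename = "_".join(words)
--     filename = filename.lower()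
--
--     # Remove special characters
--     filename = "".join(c if c.isalnum() or c == "_" else "_" for c in filename)
--     filename = "_".join(filter(None, filename.split("_")))
--
--     # Add language suffix
--     if is_native:
--         suffix = VOICES[selected_voice]['native_suffix']
--     else:
--         suffix = VOICES[selected_voice]['english_suffix']
--
--     return filename + suffix
-- ===== SOURCE B (Python) =====
-- VOICES = {
--     'french': {
--         'id': 'vTGV06pygfwa2WhLDZFp',
--         'name': 'French Darling',
--         'native_suffix': '_french',
--         'english_suffix': '_english_frenchvoice'
--     },
--     'english': {
--         'id': 'jB2lPb5DhAX6l1TLkKXy',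
--         'name': 'Sophia',
--         'native_suffix': '_english',
--         'english_suffix': '_english'
--     },
--     'spanish': {
--         'id': 'T4Au24Lt2uWk24Qra0No',
--         'name': 'Spanish Voice',
--         'native_suffix': '_spanish',
--         'english_suffix': '_english_spanishvoice'
--     },
--     'german': {
--         'id': 'rKiu7lQ4c5P3az3745s3',
--         'name': 'Benjamin',
--         'native_suffix': '_german',
--         'english_suffix': '_english_germanvoice'
--     }
-- }
--
--
-- def text_to_filename(text, selected_voice, is_native):
--     """Convert text to a safe filename: single-scan tokenizer over alnum runs."""
--     s = "_".join(text.strip().replace('\n', ' ').split()[:10]).lower()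
--     # One pass: collect maximal runs of alphanumeric characters; everything
--     # else (including '_') is a separator.
--     tokens = []
--     cur = ""
--     for c in s:
--         if c.isalnum():
--             cur += c
--         elif cur:
--             tokens.append(cur)
--             cur = ""
--     if cur:
--         tokens.append(cur)
--     voice = VOICES[selected_voice]
--     suffix = voice['native_suffix'] if is_native else voice['english_suffix']
--     return "_".join(tokens) + suffix
-- ===== Notes on version B (the rewrite author's own statement) =====
-- stated objective: alternative
-- what changed: A cleans the joined lowercased string in three passes (map every non-alnum/non-underscore char to '_', split on '_', filter out empties, re-join); B does it in a single scan that accumulates maximal alphanumeric runs as tokens and joins them once.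
import Mathlib
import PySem

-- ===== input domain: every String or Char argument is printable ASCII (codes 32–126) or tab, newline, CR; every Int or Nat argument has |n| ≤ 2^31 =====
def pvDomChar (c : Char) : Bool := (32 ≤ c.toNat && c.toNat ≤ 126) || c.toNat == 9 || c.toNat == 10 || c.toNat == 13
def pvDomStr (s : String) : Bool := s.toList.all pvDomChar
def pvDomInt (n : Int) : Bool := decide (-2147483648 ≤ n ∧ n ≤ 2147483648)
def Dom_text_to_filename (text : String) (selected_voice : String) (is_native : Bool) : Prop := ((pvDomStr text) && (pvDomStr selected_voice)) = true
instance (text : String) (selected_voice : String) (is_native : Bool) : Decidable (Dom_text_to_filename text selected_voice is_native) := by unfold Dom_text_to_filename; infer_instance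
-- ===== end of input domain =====

-- B replaces A's map-every-bad-char-to-'_' / split('_') / filter / join cleanup by a single
-- scan that accumulates maximal alphanumeric runs as tokens (alternative decomposition).

-- ===== PORT A =====
-- the module-level VOICES dict (shared data, used by both versions)
def pvVOICES : PySem.Dict String (PySem.Dict String String) :=
  ((((PySem.Dict.empty.insert "french"
    ((((PySem.Dict.empty.insert "id" "vTGV06pygfwa2WhLDZFp").insert "name" "French Darling").insert
        "native_suffix" "_french").insert "english_suffix" "_english_frenchvoice")).insert "english"
    ((((PySem.Dict.empty.insert "id" "jB2lPb5DhAX6l1TLkKXy").insert "name" "Sophia").insert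
        "native_suffix" "_english").insert "english_suffix" "_english")).insert "spanish"
    ((((PySem.Dict.empty.insert "id" "T4Au24Lt2uWk24Qra0No").insert "name" "Spanish Voice").insert
        "native_suffix" "_spanish").insert "english_suffix" "_english_spanishvoice")).insert "german"
    ((((PySem.Dict.empty.insert "id" "rKiu7lQ4c5P3az3745s3").insert "name" "Benjamin").insert
        "native_suffix" "_german").insert "english_suffix" "_english_germanvoice"))

def text_to_filename (text : String) (selected_voice : String) (is_native : Bool) : String :=
  -- words = text.strip().replace('\n', ' ').split()[:10]
  let words := PySem.List.slice (PySem.Chars.split₀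
      (PySem.Chars.replace (PySem.Chars.strip text.toList) ['\n'] [' '])) none (some 10)
  -- filename = "_".join(words); filename = filename.lower()
  let filename := PySem.Chars.lower (PySem.Chars.join ['_'] words)
  -- filename = "".join(c if c.isalnum() or c == "_" else "_" for c in filename)
  let filename := PySem.Chars.join []
      (filename.map (fun c => [if PySem.Chars.isalnum c || c == '_' then c else '_']))
  -- filename = "_".join(filter(None, filename.split("_")))
  let filename := PySem.Chars.join ['_']
      ((PySem.Chars.splitOn filename ['_']).filter (fun t => !t.isEmpty))
  match PySem.Dict.get? pvVOICES selected_voice with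
  | none => ""  -- Python raises KeyError here; excluded by Pre_
  | some voice =>
    let suffix := if is_native then PySem.Dict.getD voice "native_suffix" ""
                  else PySem.Dict.getD voice "english_suffix" ""
    String.ofList (filename ++ suffix.toList)

-- ===== PORT B =====
-- the body of B's for-loop over the characters of s
def pvStep (st : List (List Char) × List Char) (c : Char) : List (List Char) × List Char :=
  if PySem.Chars.isalnum c then (st.1, st.2 ++ [c])
  else if st.2.isEmpty then st
  else (st.1 ++ [st.2], [])

def text_to_filename_alt (text : String) (selected_voice : String) (is_native : Bool) : String :=
  -- s = "_".join(text.strip().replace('\n', ' ').split()[:10]).lower()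
  let s := PySem.Chars.lower (PySem.Chars.join ['_'] (PySem.List.slice (PySem.Chars.split₀
      (PySem.Chars.replace (PySem.Chars.strip text.toList) ['\n'] [' '])) none (some 10)))
  -- for c in s: accumulate maximal alphanumeric runs
  let r := s.foldl pvStep ([], [])
  let tokens := if r.2.isEmpty then r.1 else r.1 ++ [r.2]
  match PySem.Dict.get? pvVOICES selected_voice with
  | none => ""  -- Python raises KeyError here; excluded by Pre_
  | some voice =>
    let suffix := if is_native then PySem.Dict.getD voice "native_suffix" ""
                  else PySem.Dict.getD voice "english_suffix" ""
    String.ofList (PySem.Chars.join ['_'] tokens ++ suffix.toList)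

-- ===== PRECONDITION & SPEC =====
-- Pre_ excludes exactly the voices not in VOICES, on which Python A raises KeyError.
def Pre_text_to_filename (text : String) (selected_voice : String) (is_native : Bool) : Prop :=
  selected_voice = "french" ∨ selected_voice = "english" ∨ selected_voice = "spanish" ∨
    selected_voice = "german"
instance (text : String) (selected_voice : String) (is_native : Bool) :
    Decidable (Pre_text_to_filename text selected_voice is_native) := by
  unfold Pre_text_to_filename; infer_instance

def pvWitness_text_to_filename : String × String × Bool := ("Hello, World!\nnice day", "french", true)

def Spec_text_to_filename (text : String) (selected_voice : String) (is_native : Bool) (out : String) : Prop := out = text_to_filename_alt text selected_voice is_native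
instance (text : String) (selected_voice : String) (is_native : Bool) (out : String) : Decidable (Spec_text_to_filename text selected_voice is_native out) := by unfold Spec_text_to_filename; infer_instance

-- ===== CLAIM (what is proved, stated in full; the proofs are below) =====
def Claim_equal_text_to_filename : Prop := ∀ (text : String) (selected_voice : String) (is_native : Bool), Dom_text_to_filename text selected_voice is_native → Pre_text_to_filename text selected_voice is_native → Spec_text_to_filename text selected_voice is_native (text_to_filename text selected_voice is_native)

-- ===== LEMMAS AND PROOFS =====

-- proof-side model of Python's str.split('_') with the already-read prefix `pre`
def pvSplit (pre : List Char) : List Char → List (List Char)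
  | [] => [pre]
  | c :: r => if c = '_' then pre :: pvSplit [] r else pvSplit (pre ++ [c]) r

lemma pvGo_eq (l : List Char) : ∀ (fuel : Nat) (cur : List Char) (acc : List (List Char)),
    l.length < fuel →
    PySem.Chars.splitOn.go ['_'] fuel l cur acc = acc.reverse ++ pvSplit cur.reverse l := by
  induction l with
  | nil =>
    intro fuel cur acc h
    match fuel with
    | fuel + 1 => simp [PySem.Chars.splitOn.go, pvSplit]
  | cons c r ih =>
    intro fuel cur acc h
    match fuel with
    | fuel + 1 =>
      rw [PySem.Chars.splitOn.go]
      by_cases hc : c = '_'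
      · subst hc
        simp only [List.isPrefixOf, BEq.rfl, Bool.and_self, if_pos]
        rw [show List.drop ['_'].length ('_' :: r) = r from rfl,
          ih fuel [] (cur.reverse :: acc) (by simpa using h)]
        simp [pvSplit]
      · have : List.isPrefixOf ['_'] (c :: r) = false := by
          simp [List.isPrefixOf]; exact fun h' => absurd h'.symm hc
        rw [this]
        simp only [Bool.false_eq_true, if_false]
        rw [ih fuel (c :: cur) acc (by simpa using h)]
        simp [pvSplit, hc]

lemma pvFold_acc (l : List Char) : ∀ (tokens : List (List Char)) (cur : List Char),
    l.foldl pvStep (tokens, cur) =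
      (tokens ++ (l.foldl pvStep ([], cur)).1, (l.foldl pvStep ([], cur)).2) := by
  induction l with
  | nil => intro tokens cur; simp
  | cons c r ih =>
    intro tokens cur
    simp only [List.foldl_cons]
    by_cases ha : PySem.Chars.isalnum c
    · simp only [pvStep, ha, if_pos]
      exact ih tokens (cur ++ [c])
    · by_cases he : cur.isEmpty
      · simp only [pvStep, ha, he, Bool.false_eq_true, if_false, if_pos]
        exact ih tokens cur
      · simp only [pvStep, ha, he, Bool.false_eq_true, if_false, List.nil_append]
        rw [ih (tokens ++ [cur]) [], ih [cur] []]
        simp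

lemma pvAlnum_ne_underscore {c : Char} (h : PySem.Chars.isalnum c = true) : ¬ c = '_' := by
  intro hc; subst hc
  simp [PySem.Chars.isalnum, PySem.Chars.isalpha, PySem.Chars.isdigit, PySem.Chars.isupper,
    PySem.Chars.islower] at h

lemma pvMain (s : List Char) : ∀ (cur : List Char),
    (pvSplit cur (s.map (fun c => if PySem.Chars.isalnum c || c == '_' then c else '_'))).filter
        (fun t => !t.isEmpty) =
      (if (s.foldl pvStep ([], cur)).2.isEmpty then (s.foldl pvStep ([], cur)).1
       else (s.foldl pvStep ([], cur)).1 ++ [(s.foldl pvStep ([], cur)).2]) := by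
  induction s with
  | nil =>
    intro cur
    by_cases he : cur.isEmpty <;> simp [pvSplit, List.filter, he]
  | cons c r ih =>
    intro cur
    simp only [List.map_cons, List.foldl_cons]
    by_cases ha : PySem.Chars.isalnum c
    · have hne : ¬ c = '_' := pvAlnum_ne_underscore ha
      simp only [ha, Bool.true_or, if_pos, pvSplit, hne, if_false, pvStep]
      exact ih (cur ++ [c])
    · have hf : (if PySem.Chars.isalnum c || c == '_' then c else '_') = '_' := by
        by_cases hc : c = '_'
        · subst hc; simp
        · simp [ha, hc]
      rw [hf]
      simp only [pvSplit, if_pos, pvStep, ha, Bool.false_eq_true, if_false]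
      by_cases he : cur.isEmpty
      · have hcur : cur = [] := by simpa [List.isEmpty_iff] using he
        subst hcur
        simp only [he, if_pos, List.filter_cons, Bool.not_true,
          Bool.false_eq_true, if_false]
        exact ih []
      · simp only [he, Bool.false_eq_true, if_false, List.filter_cons, List.nil_append]
        rw [pvFold_acc r [cur] []]
        have := ih []
        by_cases h2 : (r.foldl pvStep ([], [])).2.isEmpty <;> simp_all

-- the whole cleanup stage: A's map/split/filter/join equals B's run-tokenizer, joined
lemma pvCleanup (s : List Char) :
    PySem.Chars.join ['_'] ((PySem.Chars.splitOn (PySem.Chars.join []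
        (s.map (fun c => [if PySem.Chars.isalnum c || c == '_' then c else '_']))) ['_']).filter
        (fun t => !t.isEmpty)) =
      PySem.Chars.join ['_'] (if (s.foldl pvStep ([], [])).2.isEmpty then (s.foldl pvStep ([], [])).1
        else (s.foldl pvStep ([], [])).1 ++ [(s.foldl pvStep ([], [])).2]) := by
  have hmap : PySem.Chars.join []
      (s.map (fun c => [if PySem.Chars.isalnum c || c == '_' then c else '_'])) =
      s.map (fun c => if PySem.Chars.isalnum c || c == '_' then c else '_') := by
    rw [show (s.map (fun c => [if PySem.Chars.isalnum c || c == '_' then c else '_'])) =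
        ((s.map (fun c => if PySem.Chars.isalnum c || c == '_' then c else '_')).map ([·])) by
      simp [List.map_map]]
    exact PySem.Chars.join_nil_singletons _
  rw [hmap, PySem.Chars.splitOn, pvGo_eq _ _ [] [] (by simp)]
  simp only [List.reverse_nil, List.nil_append]
  rw [pvMain s []]

-- ===== VERDICT (by name: the statement is the Claim_ definition above) =====
theorem text_to_filename_spec : Claim_equal_text_to_filename := by
  intro text selected_voice is_native _ _
  simp only [Spec_text_to_filename, text_to_filename, text_to_filename_alt]
  rw [pvCleanup]
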